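-- pv_equiv track=rewrite | github.com/theodorahaimoff/HSLU_HS25_DSPRO1 | src/backend.py | pack_context
-- ===== SOURCE A (Python) =====
-- MAX_CTX_CHARS = 8000
--
-- def pack_context(retrieved, max_chars=MAX_CTX_CHARS, per_source_cap=3):
--     ctx, total, seen = [], 0, {}
--     for doc, meta, dist in retrieved:
--         key = (meta.get("law"), meta.get("article"))
--         seen[key] = seen.get(key, 0) + 1
--         if seen[key] > per_source_cap:
--             continue
--         stamp = f"[{meta.get('law','?')} {meta.get('title','?')} – {meta.get('source')}]"
--         block = f"{stamp}\n{doc.strip()}\n\n"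
--         if total + len(block) > max_chars:
--             break
--         ctx.append(block)
--         total += len(block)
--     return "".join(ctx)
-- ===== SOURCE B (Python) =====
-- MAX_CTX_CHARS = 8000
--
-- def pack_context(retrieved, max_chars=MAX_CTX_CHARS, per_source_cap=3):
--     # Phase 1: decide which blocks qualify under the per-source cap.
--     counts = {}
--     candidates = []
--     for doc, meta, dist in retrieved:
--         key = (meta.get("law"), meta.get("article"))
--         cnt = counts.get(key, 0) + 1
--         counts[key] = cnt
--         if cnt <= per_source_cap:
--             stamp = f"[{meta.get('law','?')} {meta.get('title','?')} – {meta.get('source')}]"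
--             candidates.append(f"{stamp}\n{doc.strip()}\n\n")
--     # Phase 2: keep a prefix of the candidates fitting the character budget.
--     kept = []
--     total = 0
--     for block in candidates:
--         if total + len(block) > max_chars:
--             break
--         kept.append(block)
--         total += len(block)
--     return "".join(kept)
-- ===== Notes on version B (the rewrite author's own statement) =====
-- stated objective: alternative
-- what changed: Replaces A's single interleaved loop (count, format, budget-check, break in one pass) with a two-phase decomposition: one loop collects the cap-qualifying blocks in order, a second loop keeps the prefix of them that fits the character budget.
import Mathlib
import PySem

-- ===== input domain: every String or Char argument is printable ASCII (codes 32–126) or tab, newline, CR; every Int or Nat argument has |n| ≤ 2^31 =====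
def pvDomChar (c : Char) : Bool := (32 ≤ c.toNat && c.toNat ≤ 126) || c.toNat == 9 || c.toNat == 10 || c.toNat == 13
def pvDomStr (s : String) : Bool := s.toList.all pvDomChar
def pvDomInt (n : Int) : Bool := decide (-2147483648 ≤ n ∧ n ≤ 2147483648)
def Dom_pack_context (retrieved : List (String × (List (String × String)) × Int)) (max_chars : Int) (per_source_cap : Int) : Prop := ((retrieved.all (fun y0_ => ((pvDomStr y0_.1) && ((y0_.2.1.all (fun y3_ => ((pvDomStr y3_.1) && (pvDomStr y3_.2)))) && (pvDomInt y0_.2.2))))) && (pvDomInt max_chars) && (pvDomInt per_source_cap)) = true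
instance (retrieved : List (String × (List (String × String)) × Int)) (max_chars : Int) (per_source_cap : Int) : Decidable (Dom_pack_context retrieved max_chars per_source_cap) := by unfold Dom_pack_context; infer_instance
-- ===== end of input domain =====

-- B splits A's interleaved loop into two phases: collect cap-qualifying blocks, then keep the
-- budget-fitting prefix (objective: alternative decomposition; same cost, same return value).

-- shared formatting helper: the exact f-string block both Pythons build
-- (md.get(k) = first-match lookup in the association list; f"{None}" prints "None")
def pvBlockStr (doc : String) (md : List (String × String)) : String :=
  let stamp := "[" ++ ((md.lookup "law").getD "?") ++ " " ++ ((md.lookup "title").getD "?")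
      ++ " – " ++ ((md.lookup "source").getD "None") ++ "]"
  stamp ++ "\n" ++ PySem.Str.strip doc ++ "\n\n"

-- ===== PORT A =====
def packALoop (max_chars per_source_cap : Int) :
    List (String × (List (String × String)) × Int) →
    PySem.Dict (Option String × Option String) Int → List String → Int → List String
  | [], _, ctx, _ => ctx
  | (doc, md, _dist) :: rest, seen, ctx, total =>
    let key : Option String × Option String := (md.lookup "law", md.lookup "article")
    let seen' := seen.insert key (seen.getD key 0 + 1)
    if seen'.getD key 0 > per_source_cap then
      packALoop max_chars per_source_cap rest seen' ctx total
    else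
      let block := pvBlockStr doc md
      if total + PySem.Str.len block > max_chars then ctx
      else packALoop max_chars per_source_cap rest seen' (ctx ++ [block])
             (total + PySem.Str.len block)

def pack_context (retrieved : List (String × (List (String × String)) × Int)) (max_chars : Int) (per_source_cap : Int) : String :=
  PySem.Str.join "" (packALoop max_chars per_source_cap retrieved PySem.Dict.empty [] 0)

-- ===== PORT B =====
-- phase 1: blocks whose source is still under the per-source cap, in order
def packBCands (per_source_cap : Int) :
    List (String × (List (String × String)) × Int) →
    PySem.Dict (Option String × Option String) Int → List String
  | [], _ => []
  | (doc, md, _dist) :: rest, counts =>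
    let key : Option String × Option String := (md.lookup "law", md.lookup "article")
    let cnt := counts.getD key 0 + 1
    let counts' := counts.insert key cnt
    if cnt ≤ per_source_cap then pvBlockStr doc md :: packBCands per_source_cap rest counts'
    else packBCands per_source_cap rest counts'

-- phase 2: the prefix of candidates fitting the character budget
def packBTake (max_chars : Int) : List String → Int → List String
  | [], _ => []
  | b :: rest, total =>
    if total + PySem.Str.len b > max_chars then []
    else b :: packBTake max_chars rest (total + PySem.Str.len b)

def pack_context_alt (retrieved : List (String × (List (String × String)) × Int)) (max_chars : Int) (per_source_cap : Int) : String :=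
  PySem.Str.join "" (packBTake max_chars (packBCands per_source_cap retrieved PySem.Dict.empty) 0)

-- ===== PRECONDITION & SPEC =====
def Spec_pack_context (retrieved : List (String × (List (String × String)) × Int)) (max_chars : Int) (per_source_cap : Int) (out : String) : Prop := out = pack_context_alt retrieved max_chars per_source_cap
instance (retrieved : List (String × (List (String × String)) × Int)) (max_chars : Int) (per_source_cap : Int) (out : String) : Decidable (Spec_pack_context retrieved max_chars per_source_cap out) := by unfold Spec_pack_context; infer_instance

-- ===== CLAIM (what is proved, stated in full; the proofs are below) =====
def Claim_equal_pack_context : Prop := ∀ (retrieved : List (String × (List (String × String)) × Int)) (max_chars : Int) (per_source_cap : Int), Dom_pack_context retrieved max_chars per_source_cap → Spec_pack_context retrieved max_chars per_source_cap (pack_context retrieved max_chars per_source_cap)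

-- ===== LEMMAS AND PROOFS =====
lemma packALoop_eq (max_chars per_source_cap : Int) :
    ∀ (items : List (String × (List (String × String)) × Int))
      (seen : PySem.Dict (Option String × Option String) Int) (ctx : List String) (total : Int),
    packALoop max_chars per_source_cap items seen ctx total
      = ctx ++ packBTake max_chars (packBCands per_source_cap items seen) total := by
  intro items
  induction items with
  | nil => intro seen ctx total; simp [packALoop, packBCands, packBTake]
  | cons hd rest ih =>
    obtain ⟨doc, md, dist⟩ := hd
    intro seen ctx total
    simp only [packALoop, packBCands]
    rw [PySem.Dict.getD_insert_self]
    by_cases hcap : seen.getD (md.lookup "law", md.lookup "article") 0 + 1 > per_source_cap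
    · rw [if_pos hcap, if_neg (by omega), ih]
    · have h2 : seen.getD (md.lookup "law", md.lookup "article") 0 + 1 ≤ per_source_cap := by omega
      rw [if_neg hcap, if_pos h2]
      simp only [packBTake]
      by_cases hov : total + PySem.Str.len (pvBlockStr doc md) > max_chars
      · rw [if_pos hov, if_pos hov]; simp
      · rw [if_neg hov, if_neg hov, ih]; simp

-- ===== VERDICT (by name: the statement is the Claim_ definition above) =====
theorem pack_context_spec : Claim_equal_pack_context := by
  intro retrieved max_chars per_source_cap _
  unfold Spec_pack_context pack_context pack_context_alt
  rw [packALoop_eq]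
  simp
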